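-- pv_equiv track=rewrite | github.com/minquejoe/NKAS-tuning | module/event/minigame/game_20251204.py | _cluster_coordinates
-- ===== SOURCE A (Python) =====
-- from typing import Any, Dict, List, Optional, Tuple, Union
--
-- def _cluster_coordinates(coords: List[int], tolerance: int) -> List[List[int]]:
--     if not coords:
--         return []
--     clusters = []
--     sorted_coords = sorted(coords)
--     current_cluster = [sorted_coords[0]]
--     for coord in sorted_coords[1:]:
--         if coord - current_cluster[-1] <= tolerance:
--             current_cluster.append(coord)
--         else:
--             clusters.append(current_cluster)
--             current_cluster = [coord]
--     clusters.append(current_cluster)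
--     return clusters
-- ===== SOURCE B (Python) =====
-- def _cluster_coordinates(coords, tolerance):
--     # Boundary-first: locate the split indices (where a consecutive gap in the
--     # sorted list exceeds tolerance), then slice the sorted list between
--     # successive boundaries.
--     s = sorted(coords)
--     if not s:
--         return []
--     cuts = [i for i in range(1, len(s)) if s[i] - s[i - 1] > tolerance]
--     bounds = [0] + cuts + [len(s)]
--     return [s[a:b] for a, b in zip(bounds, bounds[1:])]
-- ===== Notes on version B (the rewrite author's own statement) =====
-- stated objective: alternative
-- what changed: Replaces the single accumulator loop (grow current_cluster, flush on a large gap) with a boundary-first two-phase computation: one comprehension collects the split indices where a sorted consecutive gap exceeds tolerance, then the sorted list is sliced between successive boundaries.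
import Mathlib
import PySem

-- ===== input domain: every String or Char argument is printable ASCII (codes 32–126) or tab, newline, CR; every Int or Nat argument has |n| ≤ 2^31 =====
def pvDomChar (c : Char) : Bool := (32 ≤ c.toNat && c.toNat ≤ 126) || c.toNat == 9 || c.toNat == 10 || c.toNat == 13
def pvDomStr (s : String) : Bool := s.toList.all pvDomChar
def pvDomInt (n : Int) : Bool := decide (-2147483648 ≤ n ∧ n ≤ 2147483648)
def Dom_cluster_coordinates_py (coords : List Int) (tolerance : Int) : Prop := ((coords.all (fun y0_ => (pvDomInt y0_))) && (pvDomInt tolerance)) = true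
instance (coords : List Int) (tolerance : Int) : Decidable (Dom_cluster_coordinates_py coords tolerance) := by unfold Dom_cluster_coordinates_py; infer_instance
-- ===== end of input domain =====

-- B computes the split indices first (where a sorted consecutive gap exceeds tolerance) and then
-- slices the sorted list between successive boundaries, instead of A's accumulator loop; objective: alternative.


-- ===== PORT A =====
-- A's loop step: state = (clusters, current_cluster); current_cluster[-1] via getLast?
-- (current_cluster is always nonempty, so the getD 0 default is never used).
def pvAStep (tolerance : Int) (st : List (List Int) × List Int) (coord : Int) :
    List (List Int) × List Int :=
  if coord - (st.2.getLast?.getD 0) ≤ tolerance then (st.1, st.2 ++ [coord])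
  else (st.1 ++ [st.2], [coord])

def cluster_coordinates_py (coords : List Int) (tolerance : Int) : List (List Int) :=
  if coords = [] then []
  else
    match PySem.List.sorted coords (fun x => x) false with
    | [] => []  -- unreachable: sorted of a nonempty list is nonempty
    | h :: t =>
      let r := t.foldl (pvAStep tolerance) ([], [h])
      r.1 ++ [r.2]

-- ===== PORT B =====
-- cuts = [i for i in range(1, len(s)) if s[i] - s[i-1] > tolerance]
-- (every index i and i-1 is in range, so the pyGetD default 0 is never used)
def pvCuts (tolerance : Int) (s : List Int) : List Int :=
  (PySem.List.pyRange 1 (s.length : Int) 1).filter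
    (fun i => decide (PySem.List.pyGetD s i 0 - PySem.List.pyGetD s (i - 1) 0 > tolerance))

def cluster_coordinates_py_alt (coords : List Int) (tolerance : Int) : List (List Int) :=
  let s := PySem.List.sorted coords (fun x => x) false
  if s = [] then []
  else
    let bounds : List Int := 0 :: (pvCuts tolerance s ++ [(s.length : Int)])
    (bounds.zip (PySem.List.slice bounds (some 1) none)).map
      (fun ab => PySem.List.slice s (some ab.1) (some ab.2))

-- ===== PRECONDITION & SPEC =====
def Spec_cluster_coordinates_py (coords : List Int) (tolerance : Int) (out : List (List Int)) : Prop := out = cluster_coordinates_py_alt coords tolerance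
instance (coords : List Int) (tolerance : Int) (out : List (List Int)) : Decidable (Spec_cluster_coordinates_py coords tolerance out) := by unfold Spec_cluster_coordinates_py; infer_instance

-- ===== CLAIM (what is proved, stated in full; the proofs are below) =====
def Claim_equal_cluster_coordinates_py : Prop := ∀ (coords : List Int) (tolerance : Int), Dom_cluster_coordinates_py coords tolerance → Spec_cluster_coordinates_py coords tolerance (cluster_coordinates_py coords tolerance)

-- ===== LEMMAS AND PROOFS =====

-- the common recursive shape both ports are reduced to: a right fold gluing each
-- element onto the front cluster when it is within tolerance of its head
def pvBStep (tolerance : Int) (clusters : List (List Int)) (x : Int) : List (List Int) :=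
  match clusters with
  | g :: gs => if (g.headD 0) - x ≤ tolerance then (x :: g) :: gs else [x] :: g :: gs
  | [] => [[x]]

def pvF (tolerance : Int) (t : List Int) : List (List Int) :=
  t.foldr (fun x acc => pvBStep tolerance acc x) []

-- ---------- A-side: A's left fold equals pvF ----------

def pvGlue (tolerance : Int) (cur : List Int) (G : List (List Int)) : List (List Int) :=
  match G with
  | [] => [cur]
  | g :: gs => if (g.headD 0) - (cur.getLast?.getD 0) ≤ tolerance then (cur ++ g) :: gs
               else cur :: g :: gs

theorem pvBStep_eq_glue (tolerance : Int) (G : List (List Int)) (c : Int) :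
    pvBStep tolerance G c = pvGlue tolerance [c] G := by
  cases G with
  | nil => rfl
  | cons g gs => simp [pvBStep, pvGlue]

theorem pvGlue_merge (tolerance : Int) (cur : List Int) (G : List (List Int)) (c : Int)
    (hc : c - (cur.getLast?.getD 0) ≤ tolerance) :
    pvGlue tolerance cur (pvBStep tolerance G c) = pvGlue tolerance (cur ++ [c]) G := by
  have hc' : c ≤ tolerance + cur.getLast?.getD 0 := by omega
  cases G with
  | nil => simp [pvBStep, pvGlue, hc']
  | cons g gs =>
    by_cases h : g.head?.getD 0 ≤ tolerance + c <;>
      simp [pvBStep, pvGlue, h, hc']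

theorem pvGlue_split (tolerance : Int) (cur : List Int) (G : List (List Int)) (c : Int)
    (hc : ¬ c - (cur.getLast?.getD 0) ≤ tolerance) :
    pvGlue tolerance cur (pvBStep tolerance G c) = cur :: pvBStep tolerance G c := by
  have hc' : ¬ c ≤ tolerance + cur.getLast?.getD 0 := by omega
  cases G with
  | nil => simp [pvBStep, pvGlue, hc']
  | cons g gs =>
    by_cases h : g.head?.getD 0 ≤ tolerance + c <;>
      simp [pvBStep, pvGlue, h, hc']

theorem pvA_inv (tolerance : Int) (t : List Int) :
    ∀ (cl : List (List Int)) (cur : List Int),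
      (t.foldl (pvAStep tolerance) (cl, cur)).1 ++ [(t.foldl (pvAStep tolerance) (cl, cur)).2] =
        cl ++ pvGlue tolerance cur (pvF tolerance t) := by
  induction t with
  | nil => intro cl cur; simp [pvF, pvGlue]
  | cons c t' ih =>
    intro cl cur
    have hF : pvF tolerance (c :: t') = pvBStep tolerance (pvF tolerance t') c := rfl
    by_cases hc : c - (cur.getLast?.getD 0) ≤ tolerance
    · have hstep : pvAStep tolerance (cl, cur) c = (cl, cur ++ [c]) := by
        simp [pvAStep, hc]
      rw [List.foldl_cons, hstep, ih, hF, pvGlue_merge tolerance cur _ c hc]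
    · have hstep : pvAStep tolerance (cl, cur) c = (cl ++ [cur], [c]) := by
        simp [pvAStep, hc]
      rw [List.foldl_cons, hstep, ih, hF, pvGlue_split tolerance cur _ c hc,
        pvBStep_eq_glue, List.append_assoc]
      rfl

theorem pvA_eq_F (coords : List Int) (tolerance : Int) (h : coords ≠ [])
    (hd : Int) (tl : List Int)
    (hs : PySem.List.sorted coords (fun x => x) false = hd :: tl) :
    cluster_coordinates_py coords tolerance = pvF tolerance (hd :: tl) := by
  unfold cluster_coordinates_py
  simp only [h, if_false, hs]
  rw [pvA_inv]
  show pvGlue tolerance [hd] (pvF tolerance tl) = pvBStep tolerance (pvF tolerance tl) hd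
  rw [pvBStep_eq_glue]

-- ---------- B-side: the boundary/slice computation equals pvF ----------

def pvSlices (s : List Int) (bounds : List Int) : List (List Int) :=
  (bounds.zip bounds.tail).map (fun ab => PySem.List.slice s (some ab.1) (some ab.2))

theorem pvSlices_cons (s : List Int) (a b : Int) (r : List Int) :
    pvSlices s (a :: b :: r) = PySem.List.slice s (some a) (some b) :: pvSlices s (b :: r) := by
  rfl

-- s[i]-gap filter on a cons, as a shifted filter on the tail
theorem pvCuts_cons (tolerance x y : Int) (t : List Int) :
    pvCuts tolerance (x :: y :: t) =
      (if y - x > tolerance then [(1 : Int)] else []) ++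
        (pvCuts tolerance (y :: t)).map (· + 1) := by
  unfold pvCuts
  have hl1 : (((x :: y :: t).length : Nat) : Int) = (t.length : Int) + 2 := by
    push_cast [List.length]; ring
  have hl2 : (((y :: t).length : Nat) : Int) = (t.length : Int) + 1 := by
    push_cast [List.length]; ring
  rw [hl1, hl2, PySem.List.pyRange_one, PySem.List.pyRange_one]
  have h1 : ((t.length : Int) + 2 - 1).toNat = t.length + 1 := by omega
  have h2 : ((t.length : Int) + 1 - 1).toNat = t.length := by omega
  rw [h1, h2, List.range_succ_eq_map]
  simp only [List.map_cons, List.map_map, List.filter_cons, List.filter_map]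
  have hc : (decide (PySem.List.pyGetD (x :: y :: t) (1 + ((0 : Nat) : Int)) 0 -
      PySem.List.pyGetD (x :: y :: t) (1 + ((0 : Nat) : Int) - 1) 0 > tolerance)) =
      decide (y - x > tolerance) := by
    have e5 : (1 : Int) + ((0 : Nat) : Int) = ((1 : Nat) : Int) := by norm_num
    have e6 : ((1 : Nat) : Int) - 1 = ((0 : Nat) : Int) := by norm_num
    simp only [e5, e6, PySem.List.pyGetD_natCast]
    rfl
  have hpred : ((fun i => decide (PySem.List.pyGetD (x :: y :: t) i 0 -
          PySem.List.pyGetD (x :: y :: t) (i - 1) 0 > tolerance)) ∘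
        (fun k : Nat => 1 + (k : Int)) ∘ Nat.succ) =
      ((fun i => decide (PySem.List.pyGetD (y :: t) i 0 -
          PySem.List.pyGetD (y :: t) (i - 1) 0 > tolerance)) ∘ fun k : Nat => 1 + (k : Int)) := by
    funext k
    simp only [Function.comp_apply]
    have e1 : (1 : Int) + ((Nat.succ k : Nat) : Int) = ((k + 2 : Nat) : Int) := by push_cast; ring
    have e3 : (1 : Int) + ((k : Nat) : Int) = ((k + 1 : Nat) : Int) := by push_cast; ring
    have e2' : ((k + 2 : Nat) : Int) - 1 = ((k + 1 : Nat) : Int) := by push_cast; ring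
    have e4' : ((k + 1 : Nat) : Int) - 1 = ((k : Nat) : Int) := by push_cast; ring
    simp only [e1, e3, e2', e4', PySem.List.pyGetD_natCast]
    rfl
  have hfun : ((fun k : Nat => 1 + (k : Int)) ∘ Nat.succ) =
      ((fun z : Int => z + 1) ∘ fun k : Nat => 1 + (k : Int)) := by
    funext k
    simp only [Function.comp_apply]
    push_cast; ring
  rw [hc, hpred, hfun]
  by_cases hg : y - x > tolerance
  · simp [hg]
  · simp [hg]

theorem pvCuts_nonneg (tolerance : Int) (s : List Int) :
    ∀ i ∈ pvCuts tolerance s, 1 ≤ i := by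
  intro i hi
  unfold pvCuts at hi
  have := (List.mem_filter.mp hi).1
  exact (PySem.List.mem_pyRange_one.mp this).1

theorem pvSlices_shift (x : Int) (s : List Int) :
    ∀ (bounds : List Int), (∀ b ∈ bounds, 0 ≤ b) →
      pvSlices (x :: s) (bounds.map (· + 1)) = pvSlices s bounds := by
  intro bounds
  induction bounds with
  | nil => intro _; rfl
  | cons a r ih =>
    intro hnn
    cases r with
    | nil => rfl
    | cons b r' =>
      have ha : 0 ≤ a := hnn a (by simp)
      have hb : 0 ≤ b := hnn b (by simp)
      have hslice : PySem.List.slice (x :: s) (some (a + 1)) (some (b + 1)) =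
          PySem.List.slice s (some a) (some b) := by
        rw [PySem.List.slice_toNat _ (by omega) (by omega),
          PySem.List.slice_toNat _ ha hb]
        have h1 : (a + 1).toNat = a.toNat + 1 := by omega
        have h2 : (b + 1).toNat = b.toNat + 1 := by omega
        simp [h1, h2]
      show pvSlices (x :: s) ((a+1) :: (b+1) :: r'.map (· + 1)) = _
      rw [pvSlices_cons, pvSlices_cons, hslice]
      have := ih (fun c hc => hnn c (List.mem_cons_of_mem a hc))
      rw [show ((b :: r').map (· + 1)) = (b+1) :: r'.map (· + 1) from rfl] at this
      rw [this]

-- the first cluster of pvF over a nonempty list starts with its head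
theorem pvF_head (tolerance y : Int) (t : List Int) :
    ∃ g gs, pvF tolerance (y :: t) = (y :: g) :: gs := by
  show ∃ g gs, pvBStep tolerance (pvF tolerance t) y = (y :: g) :: gs
  cases hG : pvF tolerance t with
  | nil => exact ⟨[], [], rfl⟩
  | cons g gs =>
    by_cases h : (g.headD 0) - y ≤ tolerance
    · have h' : g.head?.getD 0 ≤ tolerance + y := by
        rw [List.headD_eq_head?] at h; omega
      exact ⟨g, gs, by simp [pvBStep, h']⟩
    · have h' : ¬ g.head?.getD 0 ≤ tolerance + y := by
        rw [List.headD_eq_head?] at h; omega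
      exact ⟨[], g :: gs, by simp [pvBStep, h']⟩

theorem pvB_eq_F (tolerance : Int) :
    ∀ (s : List Int), s ≠ [] →
      pvSlices s (0 :: (pvCuts tolerance s ++ [(s.length : Int)])) = pvF tolerance s := by
  intro s
  induction s with
  | nil => intro h; exact absurd rfl h
  | cons x s' ih =>
    intro _
    cases s' with
    | nil =>
      have hcuts : pvCuts tolerance [x] = [] := by
        unfold pvCuts
        rw [PySem.List.pyRange_one_eq_nil (by simp)]
        rfl
      rw [hcuts]
      show pvSlices [x] [0, 1] = [[x]]
      rw [show pvSlices [x] [0, 1] = [PySem.List.slice [x] (some 0) (some 1)] from rfl]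
      rw [PySem.List.slice_toNat _ (by omega) (by omega)]
      rfl
    | cons y t =>
      have ihs := ih (by simp)
      rw [pvCuts_cons]
      have hnn : ∀ b ∈ (0 : Int) :: (pvCuts tolerance (y :: t) ++ [((y :: t).length : Int)]), 0 ≤ b := by
        intro b hb
        rcases List.mem_cons.mp hb with h0 | h1
        · omega
        · rcases List.mem_append.mp h1 with h2 | h3
          · have := pvCuts_nonneg tolerance (y :: t) b h2; omega
          · simp at h3; omega
      by_cases hgap : y - x > tolerance
      · -- new cluster at x
        simp only [hgap, if_true]
        have hlen : (((x :: y :: t).length : Nat) : Int) = ((y :: t).length : Int) + 1 := by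
          simp
        rw [hlen]
        show pvSlices (x :: y :: t)
            (0 :: 1 :: ((pvCuts tolerance (y :: t)).map (· + 1) ++ [((y :: t).length : Int) + 1])) = _
        have hmap : (pvCuts tolerance (y :: t)).map (· + 1) ++ [((y :: t).length : Int) + 1] =
            ((pvCuts tolerance (y :: t)) ++ [((y :: t).length : Int)]).map (· + 1) := by
          simp
        rw [hmap, pvSlices_cons]
        have hshift : pvSlices (x :: y :: t)
            ((1 : Int) :: ((pvCuts tolerance (y :: t)) ++ [((y :: t).length : Int)]).map (· + 1)) =
            pvSlices (y :: t) (0 :: (pvCuts tolerance (y :: t) ++ [((y :: t).length : Int)])) := by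
          have := pvSlices_shift x (y :: t) _ hnn
          rw [show (((0 : Int) :: (pvCuts tolerance (y :: t) ++ [((y :: t).length : Int)])).map (· + 1)) =
              (1 : Int) :: ((pvCuts tolerance (y :: t)) ++ [((y :: t).length : Int)]).map (· + 1) by simp] at this
          exact this
        rw [hshift, ihs]
        have hx : PySem.List.slice (x :: y :: t) (some 0) (some 1) = [x] := by
          rw [PySem.List.slice_toNat _ (by omega) (by omega)]; rfl
        rw [hx]
        -- RHS
        obtain ⟨g, gs, hg⟩ := pvF_head tolerance y t
        show _ = pvBStep tolerance (pvF tolerance (y :: t)) x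
        rw [hg]
        simp only [pvBStep, List.headD]
        rw [if_neg (by omega)]
      · -- x joins the first cluster
        simp only [hgap, if_false, List.nil_append]
        have hlen : (((x :: y :: t).length : Nat) : Int) = ((y :: t).length : Int) + 1 := by simp
        rw [hlen]
        -- write cuts' ++ [n'] as d :: ds
        obtain ⟨d, ds, hdds⟩ : ∃ d ds, pvCuts tolerance (y :: t) ++ [((y :: t).length : Int)] = d :: ds := by
          cases h : pvCuts tolerance (y :: t) ++ [((y :: t).length : Int)] with
          | nil => exact absurd h (by simp)
          | cons d ds => exact ⟨d, ds, rfl⟩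
        have hd1 : 1 ≤ d := by
          rcases (List.mem_append.mp (by rw [hdds]; exact List.mem_cons_self ..)) with h2 | h3
          · exact pvCuts_nonneg tolerance (y :: t) d h2
          · simp at h3; omega
        have hmap : (pvCuts tolerance (y :: t)).map (· + 1) ++ [((y :: t).length : Int) + 1] =
            (d + 1) :: ds.map (· + 1) := by
          have : ((pvCuts tolerance (y :: t)) ++ [((y :: t).length : Int)]).map (· + 1) =
              (d + 1) :: ds.map (· + 1) := by rw [hdds]; rfl
          simpa using this
        rw [hmap]
        rw [pvSlices_cons]
        have hshift : pvSlices (x :: y :: t) ((d + 1) :: ds.map (· + 1)) =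
            pvSlices (y :: t) (d :: ds) := by
          have hnn' : ∀ b ∈ d :: ds, 0 ≤ b := by
            intro b hb; apply hnn; rw [hdds] at *; exact List.mem_cons_of_mem 0 hb
          have := pvSlices_shift x (y :: t) (d :: ds) hnn'
          rw [show ((d :: ds).map (· + 1)) = (d + 1) :: ds.map (· + 1) from rfl] at this
          exact this
        rw [hshift]
        -- the first slice absorbs x
        have hfirst : PySem.List.slice (x :: y :: t) (some 0) (some (d + 1)) =
            x :: PySem.List.slice (y :: t) (some 0) (some d) := by
          rw [PySem.List.slice_toNat _ (by omega) (by omega),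
            PySem.List.slice_toNat _ (by omega) (by omega)]
          have h1 : (d + 1).toNat = d.toNat + 1 := by omega
          simp [h1]
        rw [hfirst]
        -- relate to pvF via ihs rewritten through hdds
        have ihs' : PySem.List.slice (y :: t) (some 0) (some d) :: pvSlices (y :: t) (d :: ds) =
            pvF tolerance (y :: t) := by
          rw [← ihs, hdds, pvSlices_cons]
        obtain ⟨g, gs, hg⟩ := pvF_head tolerance y t
        show _ = pvBStep tolerance (pvF tolerance (y :: t)) x
        rw [hg]
        simp only [pvBStep, List.headD]
        rw [if_pos (by omega)]
        rw [hg] at ihs'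
        have hgeq : PySem.List.slice (y :: t) (some 0) (some d) = y :: g :=
          (List.cons.injEq _ _ _ _).mp ihs' |>.1
        have hgseq : pvSlices (y :: t) (d :: ds) = gs :=
          (List.cons.injEq _ _ _ _).mp ihs' |>.2
        rw [hgeq, hgseq]

-- sorted of a nonempty list is nonempty
theorem pvSorted_ne_nil (coords : List Int) (h : coords ≠ []) :
    PySem.List.sorted coords (fun x => x) false ≠ [] := by
  intro hs
  have := PySem.List.sorted_perm coords (fun x : Int => x) false
  rw [hs] at this
  exact h (List.Perm.nil_eq this).symm

theorem pvAlt_eq_F (coords : List Int) (tolerance : Int) (_h : coords ≠ [])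
    (hd : Int) (tl : List Int)
    (hs : PySem.List.sorted coords (fun x => x) false = hd :: tl) :
    cluster_coordinates_py_alt coords tolerance = pvF tolerance (hd :: tl) := by
  unfold cluster_coordinates_py_alt
  simp only [hs, if_neg (by simp : ¬ (hd :: tl) = [])]
  rw [PySem.List.slice_from_one]
  exact pvB_eq_F tolerance (hd :: tl) (by simp)

-- ===== VERDICT (by name: the statement is the Claim_ definition above) =====
theorem cluster_coordinates_py_spec : Claim_equal_cluster_coordinates_py := by
  intro coords tolerance _
  unfold Spec_cluster_coordinates_py
  by_cases h : coords = []
  · subst h; rfl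
  · cases hs : PySem.List.sorted coords (fun x => x) false with
    | nil => exact absurd hs (pvSorted_ne_nil coords h)
    | cons hd tl =>
      rw [pvA_eq_F coords tolerance h hd tl hs, pvAlt_eq_F coords tolerance h hd tl hs]
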